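-- pv_equiv track=rewrite | github.com/brunchmate/-AlgorithmStudy | maplejh/Programmers/지형 편집.py | solution
-- ===== SOURCE A (Python) =====
-- from collections import defaultdict
--
-- def solution(land, P, Q):
--     n = len(land)
--     blocks = defaultdict(int)
--     over_block = 0  # 기준 높이보다 더 있는 블록의 수
--     h_block = n * n  # 기준 높이에 있는 블록의 수
--     for l in land:
--         for ll in l:
--             if ll:
--                 blocks[ll] += 1
--             else:
--                 h_block -= 1
--             over_block += ll
--
--     fill_block = 0  # 기준 높이를 채우기 위한 블록의 수
--     answer = over_block * Q
--     prior = 0  # 이전의 높이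
--     for flag in sorted(blocks.keys()):
--         over_block -= h_block * (flag - prior)
--         fill_block += (n * n - h_block) * (flag - prior)
--         h_block -= blocks[flag]
--         cost = fill_block * P + over_block * Q
--         if answer > cost:
--             answer = cost
--         prior = flag
--     return answer
-- ===== SOURCE B (Python) =====
-- def solution(land, P, Q):
--     n = len(land)
--     zeros = sum(row.count(0) for row in land)
--     heights = sorted(c for row in land for c in row if c)
--     m = len(heights)
--     prefix = [0]
--     run = 0
--     for h in heights:
--         run += h
--         prefix.append(run)
--     best = sum(sum(row) for row in land) * Q
--     for i in range(m):
--         h = heights[i]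
--         fill = zeros * h + h * (i + 1) - prefix[i + 1]
--         over = prefix[m] - prefix[i + 1] - (n * n - zeros - i - 1) * h
--         best = min(best, fill * P + over * Q)
--     return best
-- ===== Notes on version B (the rewrite author's own statement) =====
-- stated objective: alternative
-- what changed: Replaced A's stateful incremental sweep (Counter of heights, sorted distinct keys, running over/fill/h_block deltas between consecutive heights) by sorting the multiset of nonzero cells once, building a prefix-sum array, and evaluating each candidate cost in closed form from the prefix sums; the minimum is taken over the same candidates.
import Mathlib
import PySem

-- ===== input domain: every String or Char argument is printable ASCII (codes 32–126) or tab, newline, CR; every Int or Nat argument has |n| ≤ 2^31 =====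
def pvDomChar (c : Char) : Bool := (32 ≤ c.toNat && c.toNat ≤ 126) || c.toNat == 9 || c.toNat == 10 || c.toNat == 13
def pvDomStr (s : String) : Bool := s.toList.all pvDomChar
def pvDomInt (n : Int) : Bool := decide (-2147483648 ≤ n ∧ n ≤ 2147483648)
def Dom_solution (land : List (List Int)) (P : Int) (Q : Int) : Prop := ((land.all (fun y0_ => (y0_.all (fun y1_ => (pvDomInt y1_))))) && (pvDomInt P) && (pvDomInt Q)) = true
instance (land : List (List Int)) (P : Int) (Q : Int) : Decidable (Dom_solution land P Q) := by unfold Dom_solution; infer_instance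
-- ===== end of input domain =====

-- B replaces A's incremental sorted sweep over distinct heights by sorting the cell multiset once and computing
-- each candidate cost in closed form from prefix sums (alternative algorithm, same value on every input).

-- ===== PORT A =====
-- body of the nested build loop: blocks counter / over_block / h_block
def pvBuildStep (st : PySem.Dict Int Int × Int × Int) (ll : Int) : PySem.Dict Int Int × Int × Int :=
  if ll ≠ 0 then (st.1.modify ll 0 (· + 1), st.2.1 + ll, st.2.2)
  else (st.1, st.2.1 + ll, st.2.2 - 1)

-- body of the sweep loop; state = (over_block, fill_block, h_block, answer, prior)
def pvSweepStep (blocks : PySem.Dict Int Int) (n P Q : Int)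
    (st : Int × Int × Int × Int × Int) (flag : Int) : Int × Int × Int × Int × Int :=
  let ov := st.1 - st.2.2.1 * (flag - st.2.2.2.2)
  let fl := st.2.1 + (n * n - st.2.2.1) * (flag - st.2.2.2.2)
  let hb := st.2.2.1 - blocks.getD flag 0
  let cost := fl * P + ov * Q
  let ans := if st.2.2.2.1 > cost then cost else st.2.2.2.1
  (ov, fl, hb, ans, flag)

def solution (land : List (List Int)) (P : Int) (Q : Int) : Int :=
  let n : Int := land.length
  let built := land.foldl (fun st l => l.foldl pvBuildStep st) (PySem.Dict.empty, 0, n * n)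
  let blocks := built.1
  let r := (PySem.List.sorted blocks.keys (fun x => x) false).foldl
      (pvSweepStep blocks n P Q) (built.2.1, 0, built.2.2, built.2.1 * Q, 0)
  r.2.2.2.1

-- ===== PORT B =====
def solution_alt (land : List (List Int)) (P : Int) (Q : Int) : Int :=
  let n : Int := land.length
  let zeros : Int := (land.map (fun row => (row.count 0 : Int))).sum
  let heights := PySem.List.sorted (land.flatMap (fun row => row.filter (fun c => c ≠ 0))) (fun x => x) false
  let m : Int := heights.length
  let pr := (heights.foldl (fun st h => (st.1 ++ [st.2 + h], st.2 + h)) (([0] : List Int), (0 : Int))).1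
  (PySem.List.pyRange 0 m 1).foldl (fun best i =>
    let h := PySem.List.pyGetD heights i 0
    let fill := zeros * h + h * (i + 1) - PySem.List.pyGetD pr (i + 1) 0
    let excess := PySem.List.pyGetD pr m 0 - PySem.List.pyGetD pr (i + 1) 0 - (n * n - zeros - i - 1) * h
    min best (fill * P + excess * Q)) ((land.map (fun row => row.sum)).sum * Q)

-- ===== PRECONDITION & SPEC =====
def Spec_solution (land : List (List Int)) (P : Int) (Q : Int) (out : Int) : Prop := out = solution_alt land P Q
instance (land : List (List Int)) (P : Int) (Q : Int) (out : Int) : Decidable (Spec_solution land P Q out) := by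
  unfold Spec_solution; infer_instance

-- ===== CLAIM (what is proved, stated in full; the proofs are below) =====
def Claim_equal_solution : Prop := ∀ (land : List (List Int)) (P : Int) (Q : Int),
  Dom_solution land P Q → Spec_solution land P Q (solution land P Q)

-- ===== LEMMAS AND PROOFS =====

-- closed-form per-candidate quantities (proof-side vocabulary)
def pvOvF (cells : List Int) (pad f : Int) : Int :=
  cells.sum - pad * f - ((cells.filter (fun c => c ≠ 0)).map (fun c => min c f)).sum
def pvFlF (cells : List Int) (f : Int) : Int :=
  (cells.count 0 : Int) * f + ((cells.filter (fun c => c ≠ 0)).map (fun c => max (f - c) 0)).sum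
def pvCF (P Q : Int) (cells : List Int) (pad f : Int) : Int :=
  pvFlF cells f * P + pvOvF cells pad f * Q

-- B's per-candidate cost
def pvCostB (P Q : Int) (cells : List Int) (h : Int) : Int :=
  (cells.map (fun c => max (h - c) 0)).sum * P + (cells.map (fun c => max (c - h) 0)).sum * Q

-- the three-component build loop is three independent folds
lemma pvBuild_fold (l : List Int) : ∀ (d : PySem.Dict Int Int) (ov hb : Int),
    l.foldl pvBuildStep (d, ov, hb)
    = (l.foldl (fun d c => if c ≠ 0 then d.modify c 0 (· + 1) else d) d,
       ov + l.sum, hb - (l.count 0 : Int)) := by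
  induction l with
  | nil => intro d ov hb; simp
  | cons c t ih =>
    intro d ov hb
    by_cases hc : c = 0
    · subst hc
      simp only [List.foldl_cons, pvBuildStep, ne_eq, not_true_eq_false, if_false,
        List.sum_cons]
      rw [ih, List.count_cons_self, Prod.mk.injEq, Prod.mk.injEq]
      refine ⟨rfl, by ring, by push_cast; ring⟩
    · simp only [List.foldl_cons, pvBuildStep, ne_eq, hc, not_false_iff, if_true,
        List.sum_cons]
      rw [ih, List.count_cons_of_ne (by simpa using hc), Prod.mk.injEq, Prod.mk.injEq]
      exact ⟨rfl, by ring, rfl⟩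

-- shift lemmas between two candidate heights with no cell value strictly between
lemma pvSumMin (p f : Int) (l : List Int) (hpf : p < f) (hsplit : ∀ c ∈ l, c ≤ p ∨ f ≤ c) :
    (l.map (fun c => min c f)).sum
    = (l.map (fun c => min c p)).sum
      + ((l.length : Int) - (l.countP (fun c => decide (c ≤ p)) : Int)) * (f - p) := by
  induction l with
  | nil => simp
  | cons c t ih =>
    have hc := hsplit c (List.mem_cons_self ..)
    have ht : ∀ x ∈ t, x ≤ p ∨ f ≤ x := fun x hx => hsplit x (List.mem_cons_of_mem _ hx)
    simp only [List.map_cons, List.sum_cons, List.countP_cons, List.length_cons]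
    rw [ih ht]
    rcases hc with hc | hc
    · rw [if_pos (by simpa using hc)]
      have h1 : min c f = c := by omega
      have h2 : min c p = c := by omega
      rw [h1, h2]; push_cast; ring
    · rw [if_neg (by simp; omega)]
      have h1 : min c f = f := by omega
      have h2 : min c p = p := by omega
      rw [h1, h2]; push_cast; ring

lemma pvSumMax (p f : Int) (l : List Int) (hpf : p < f) (hsplit : ∀ c ∈ l, c ≤ p ∨ f ≤ c) :
    (l.map (fun c => max (f - c) 0)).sum
    = (l.map (fun c => max (p - c) 0)).sum
      + (l.countP (fun c => decide (c ≤ p)) : Int) * (f - p) := by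
  induction l with
  | nil => simp
  | cons c t ih =>
    have hc := hsplit c (List.mem_cons_self ..)
    have ht : ∀ x ∈ t, x ≤ p ∨ f ≤ x := fun x hx => hsplit x (List.mem_cons_of_mem _ hx)
    simp only [List.map_cons, List.sum_cons, List.countP_cons]
    rw [ih ht]
    rcases hc with hc | hc
    · rw [if_pos (by simpa using hc)]
      have h1 : max (f - c) 0 = f - c := by omega
      have h2 : max (p - c) 0 = p - c := by omega
      rw [h1, h2]; push_cast; ring
    · rw [if_neg (by simp; omega)]
      have h1 : max (f - c) 0 = 0 := by omega
      have h2 : max (p - c) 0 = 0 := by omega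
      rw [h1, h2]; push_cast; ring

lemma pvCntLe (p f : Int) (l : List Int) (hpf : p < f) (hsplit : ∀ c ∈ l, c ≤ p ∨ f ≤ c) :
    l.countP (fun c => decide (c ≤ f))
    = l.countP (fun c => decide (c ≤ p)) + l.count f := by
  induction l with
  | nil => simp
  | cons c t ih =>
    have hc := hsplit c (List.mem_cons_self ..)
    have ht : ∀ x ∈ t, x ≤ p ∨ f ≤ x := fun x hx => hsplit x (List.mem_cons_of_mem _ hx)
    simp only [List.countP_cons, List.count_cons, ih ht]
    rcases hc with hc | hc
    · rw [if_pos (by simp; omega), if_pos (by simpa using hc), if_neg (by simp; omega)]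
      omega
    · by_cases he : c = f
      · subst he
        rw [if_pos (by simp), if_neg (by simp; omega), if_pos (by simp)]
        omega
      · rw [if_neg (by simp; omega), if_neg (by simp; omega), if_neg (by simp [he])]
        omega

-- first-step (minimum candidate) lemmas
lemma pvSumMin_min (f : Int) (l : List Int) (hmin : ∀ c ∈ l, f ≤ c) :
    (l.map (fun c => min c f)).sum = (l.length : Int) * f := by
  induction l with
  | nil => simp
  | cons c t ih =>
    have hc := hmin c (List.mem_cons_self ..)
    have ht : ∀ x ∈ t, f ≤ x := fun x hx => hmin x (List.mem_cons_of_mem _ hx)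
    simp only [List.map_cons, List.sum_cons, List.length_cons, ih ht]
    have h1 : min c f = f := by omega
    rw [h1]; push_cast; ring

lemma pvSumMax_min (f : Int) (l : List Int) (hmin : ∀ c ∈ l, f ≤ c) :
    (l.map (fun c => max (f - c) 0)).sum = 0 := by
  induction l with
  | nil => simp
  | cons c t ih =>
    have hc := hmin c (List.mem_cons_self ..)
    have ht : ∀ x ∈ t, f ≤ x := fun x hx => hmin x (List.mem_cons_of_mem _ hx)
    simp only [List.map_cons, List.sum_cons, ih ht]
    have h1 : max (f - c) 0 = 0 := by omega
    rw [h1]; ring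

lemma pvCntLe_min (f : Int) (l : List Int) (hmin : ∀ c ∈ l, f ≤ c) :
    l.countP (fun c => decide (c ≤ f)) = l.count f := by
  induction l with
  | nil => simp
  | cons c t ih =>
    have hc := hmin c (List.mem_cons_self ..)
    have ht : ∀ x ∈ t, f ≤ x := fun x hx => hmin x (List.mem_cons_of_mem _ hx)
    simp only [List.countP_cons, List.count_cons, ih ht]
    by_cases he : c = f
    · subst he; rw [if_pos (by simp), if_pos (by simp)]
    · rw [if_neg (by simp; omega), if_neg (by simp [he])]

lemma pvNzLen (cells : List Int) :
    ((cells.filter (fun c => c ≠ 0)).length : Int) = (cells.length : Int) - (cells.count 0 : Int) := by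
  induction cells with
  | nil => simp
  | cons c t ih =>
    by_cases hc : c = 0
    · subst hc
      rw [List.filter_cons_of_neg (by simp), List.count_cons_self, List.length_cons]
      push_cast; omega
    · rw [List.filter_cons_of_pos (by simpa using hc),
        List.count_cons_of_ne (by simpa using hc), List.length_cons, List.length_cons]
      push_cast; omega

lemma pvIfGt (a x : Int) : (if a > x then x else a) = min a x := by
  simp only [gt_iff_lt]
  split
  · omega
  · omega

-- the sweep maintains the closed forms once the prior is the least candidate or beyond
lemma pvSweepAux (P Q n : Int) (cells : List Int) (fs : List Int) : ∀ (p ans : Int),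
    fs.Pairwise (· < ·) →
    (∀ f ∈ fs, p < f) →
    (∀ c ∈ cells.filter (fun c => c ≠ 0), c ≤ p ∨ c ∈ fs) →
    (∀ f ∈ fs, f ∈ cells.filter (fun c => c ≠ 0)) →
    (fs.foldl (pvSweepStep (PySem.Dict.counter (cells.filter (fun c => c ≠ 0))) n P Q)
      (pvOvF cells (n * n - (cells.length : Int)) p, pvFlF cells p,
       n * n - (cells.count 0 : Int)
         - ((cells.filter (fun c => c ≠ 0)).countP (fun c => decide (c ≤ p)) : Int),
       ans, p)).2.2.2.1
    = fs.foldl (fun a f => min a (pvCF P Q cells (n * n - (cells.length : Int)) f)) ans := by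
  induction fs with
  | nil => intro p ans _ _ _ _; rfl
  | cons f rest ih =>
    intro p ans hpw hlt hsplit hmem
    have hf : p < f := hlt f (List.mem_cons_self ..)
    have hrest_lt : ∀ r ∈ rest, f < r := (List.pairwise_cons.mp hpw).1
    have hpw' : rest.Pairwise (· < ·) := (List.pairwise_cons.mp hpw).2
    have hsplit2 : ∀ c ∈ cells.filter (fun c => c ≠ 0), c ≤ p ∨ f ≤ c := by
      intro c hc
      rcases hsplit c hc with h1 | h1
      · exact Or.inl h1
      · rcases List.mem_cons.mp h1 with h2 | h2
        · exact Or.inr (le_of_eq h2.symm)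
        · exact Or.inr (le_of_lt (hrest_lt c h2))
    have hsplit' : ∀ c ∈ cells.filter (fun c => c ≠ 0), c ≤ f ∨ c ∈ rest := by
      intro c hc
      rcases hsplit c hc with h1 | h1
      · exact Or.inl (le_of_lt (lt_of_le_of_lt h1 hf))
      · rcases List.mem_cons.mp h1 with h2 | h2
        · exact Or.inl (le_of_eq h2)
        · exact Or.inr h2
    have hmem' : ∀ g ∈ rest, g ∈ cells.filter (fun c => c ≠ 0) :=
      fun g hg => hmem g (List.mem_cons_of_mem _ hg)
    have e1 := pvSumMin p f (cells.filter (fun c => c ≠ 0)) hf hsplit2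
    have e2 := pvNzLen cells
    have e3 := pvSumMax p f (cells.filter (fun c => c ≠ 0)) hf hsplit2
    have e4 := pvCntLe p f (cells.filter (fun c => c ≠ 0)) hf hsplit2
    have hov : pvOvF cells (n * n - (cells.length : Int)) p
        - (n * n - (cells.count 0 : Int)
            - ((cells.filter (fun c => c ≠ 0)).countP (fun c => decide (c ≤ p)) : Int)) * (f - p)
        = pvOvF cells (n * n - (cells.length : Int)) f := by
      unfold pvOvF; rw [e1, e2]; ring
    have hfl : pvFlF cells p
        + (n * n - (n * n - (cells.count 0 : Int)
            - ((cells.filter (fun c => c ≠ 0)).countP (fun c => decide (c ≤ p)) : Int))) * (f - p)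
        = pvFlF cells f := by
      unfold pvFlF; rw [e3]; ring
    have hhb : (n * n - (cells.count 0 : Int)
            - ((cells.filter (fun c => c ≠ 0)).countP (fun c => decide (c ≤ p)) : Int))
        - ((cells.filter (fun c => c ≠ 0)).count f : Int)
        = n * n - (cells.count 0 : Int)
            - ((cells.filter (fun c => c ≠ 0)).countP (fun c => decide (c ≤ f)) : Int) := by
      rw [e4]; push_cast; ring
    rw [List.foldl_cons, List.foldl_cons]
    have hstep : pvSweepStep (PySem.Dict.counter (cells.filter (fun c => c ≠ 0))) n P Q
        (pvOvF cells (n * n - (cells.length : Int)) p, pvFlF cells p,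
         n * n - (cells.count 0 : Int)
           - ((cells.filter (fun c => c ≠ 0)).countP (fun c => decide (c ≤ p)) : Int), ans, p) f
        = (pvOvF cells (n * n - (cells.length : Int)) f, pvFlF cells f,
           n * n - (cells.count 0 : Int)
             - ((cells.filter (fun c => c ≠ 0)).countP (fun c => decide (c ≤ f)) : Int),
           min ans (pvCF P Q cells (n * n - (cells.length : Int)) f), f) := by
      simp only [pvSweepStep, PySem.Dict.getD_counter]
      rw [Prod.mk.injEq, Prod.mk.injEq, Prod.mk.injEq, Prod.mk.injEq]
      refine ⟨hov, hfl, hhb, ?_, rfl⟩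
      rw [hfl, hov, pvIfGt]
      rfl
    rw [hstep]
    exact ih f (min ans (pvCF P Q cells (n * n - (cells.length : Int)) f)) hpw' hrest_lt hsplit' hmem'

-- A's whole computation, as a min-fold of the closed-form cost over the sorted distinct nonzero heights
lemma pvA_eq (land : List (List Int)) (P Q : Int) :
    solution land P Q
    = (PySem.List.sorted (PySem.Set.ofList (land.flatten.filter (fun c => c ≠ 0))) (fun x => x) false).foldl
        (fun a f => min a (pvCF P Q land.flatten ((land.length : Int) * (land.length : Int) - (land.flatten.length : Int)) f))
        (land.flatten.sum * Q) := by
  set cells := land.flatten with hc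
  set nz := cells.filter (fun c => c ≠ 0) with hnz
  set n : Int := (land.length : Int) with hn
  set pad : Int := n * n - (cells.length : Int) with hpad
  set z : Int := (cells.count 0 : Int) with hz
  have hbuild : land.foldl (fun st l => l.foldl pvBuildStep st) (PySem.Dict.empty, 0, n * n)
      = (PySem.Dict.counter nz, cells.sum, n * n - z) := by
    rw [← List.foldl_flatten, ← hc, pvBuild_fold]
    rw [PySem.List.foldl_ite_eq_foldl_filter (p := fun c => c ≠ 0)
      (f := fun (d : PySem.Dict Int Int) c => d.modify c 0 (· + 1))]
    rw [← PySem.Dict.counter_eq_foldl, ← hnz, ← hz]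
    norm_num
  have hkeys : (PySem.Dict.counter nz).keys = PySem.Set.ofList nz := PySem.Dict.keys_counter ..
  set flags := PySem.List.sorted (PySem.Set.ofList nz) (fun x => x) false with hflags
  have hpw : flags.Pairwise (· < ·) := PySem.List.sorted_ofList_pairwise_lt ..
  have hmemf : ∀ x, x ∈ flags ↔ x ∈ nz := by
    intro x
    rw [hflags, PySem.List.mem_sorted, PySem.Set.mem_ofList]
  unfold solution
  dsimp only
  rw [← hn, hbuild]
  dsimp only
  rw [hkeys, ← hflags]
  rcases hfl : flags with _ | ⟨f1, rest⟩
  · rfl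
  · have hmin : ∀ c ∈ nz, f1 ≤ c := by
      intro c hcm
      have : c ∈ flags := (hmemf c).mpr hcm
      rw [hfl] at this
      rcases List.mem_cons.mp this with h2 | h2
      · exact le_of_eq h2.symm
      · exact le_of_lt ((List.pairwise_cons.mp (hfl ▸ hpw)).1 c h2)
    have e1 := pvSumMin_min f1 nz hmin
    have e2 := pvNzLen cells
    have e3 := pvSumMax_min f1 nz hmin
    have e4 := pvCntLe_min f1 nz hmin
    have hov : cells.sum - (n * n - z) * (f1 - 0) = pvOvF cells pad f1 := by
      unfold pvOvF; rw [← hnz, e1, e2]; rw [hpad, hz]; ring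
    have hfl1 : (0 : Int) + (n * n - (n * n - z)) * (f1 - 0) = pvFlF cells f1 := by
      unfold pvFlF; rw [← hnz, e3, ← hz]; ring
    have hhb : (n * n - z) - (nz.count f1 : Int)
        = n * n - z - (nz.countP (fun c => decide (c ≤ f1)) : Int) := by
      rw [e4]
    rw [List.foldl_cons, List.foldl_cons]
    have hstep : pvSweepStep (PySem.Dict.counter nz) n P Q
        (cells.sum, 0, n * n - z, cells.sum * Q, 0) f1
        = (pvOvF cells pad f1, pvFlF cells f1,
           n * n - z - (nz.countP (fun c => decide (c ≤ f1)) : Int),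
           min (cells.sum * Q) (pvCF P Q cells pad f1), f1) := by
      simp only [pvSweepStep, PySem.Dict.getD_counter]
      rw [Prod.mk.injEq, Prod.mk.injEq, Prod.mk.injEq, Prod.mk.injEq]
      refine ⟨hov, hfl1, hhb, ?_, rfl⟩
      rw [hfl1, hov, pvIfGt]
      rfl
    rw [hstep]
    have hpwc := List.pairwise_cons.mp (hfl ▸ hpw)
    have := pvSweepAux P Q n cells rest f1
      (min (cells.sum * Q) (pvCF P Q cells pad f1)) hpwc.2 hpwc.1
      (by
        intro c hcm
        have : c ∈ flags := (hmemf c).mpr hcm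
        rw [hfl] at this
        rcases List.mem_cons.mp this with h2 | h2
        · exact Or.inl (le_of_eq h2)
        · exact Or.inr h2)
      (fun g hg => (hmemf g).mp (hfl ▸ List.mem_cons_of_mem f1 hg))
    rw [← hnz, ← hz, ← hpad] at this
    exact this


-- elementwise sums of the fill/excess maps on an all-≤h / all-≥h block
lemma pvMaxLe (h : Int) (l : List Int) (hall : ∀ x ∈ l, x ≤ h) :
    (l.map (fun c => max (h - c) 0)).sum = h * (l.length : Int) - l.sum := by
  induction l with
  | nil => simp
  | cons c t ih =>
    have hc := hall c (List.mem_cons_self ..)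
    rw [List.map_cons, List.sum_cons, List.sum_cons, List.length_cons,
      ih (fun x hx => hall x (List.mem_cons_of_mem _ hx))]
    have : max (h - c) 0 = h - c := by omega
    rw [this]; push_cast; ring

lemma pvMaxGe (h : Int) (l : List Int) (hall : ∀ x ∈ l, h ≤ x) :
    (l.map (fun c => max (h - c) 0)).sum = 0 := by
  induction l with
  | nil => simp
  | cons c t ih =>
    have hc := hall c (List.mem_cons_self ..)
    rw [List.map_cons, List.sum_cons, ih (fun x hx => hall x (List.mem_cons_of_mem _ hx))]
    have : max (h - c) 0 = 0 := by omega
    rw [this]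
    norm_num

lemma pvMinLe (h : Int) (l : List Int) (hall : ∀ x ∈ l, x ≤ h) :
    (l.map (fun c => min c h)).sum = l.sum := by
  induction l with
  | nil => simp
  | cons c t ih =>
    have hc := hall c (List.mem_cons_self ..)
    rw [List.map_cons, List.sum_cons, List.sum_cons,
      ih (fun x hx => hall x (List.mem_cons_of_mem _ hx))]
    have : min c h = c := by omega
    rw [this]

lemma pvMinGe (h : Int) (l : List Int) (hall : ∀ x ∈ l, h ≤ x) :
    (l.map (fun c => min c h)).sum = h * (l.length : Int) := by
  induction l with
  | nil => simp
  | cons c t ih =>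
    have hc := hall c (List.mem_cons_self ..)
    rw [List.map_cons, List.sum_cons, List.length_cons,
      ih (fun x hx => hall x (List.mem_cons_of_mem _ hx))]
    have : min c h = h := by omega
    rw [this]; push_cast; ring

-- the zero cells contribute nothing to the total
lemma pvSumFilterNe (cells : List Int) :
    (cells.filter (fun c => c ≠ 0)).sum = cells.sum := by
  induction cells with
  | nil => simp
  | cons c t ih =>
    by_cases hc : c = 0
    · subst hc; rw [List.filter_cons_of_neg (by simp), List.sum_cons, ih]; ring
    · rw [List.filter_cons_of_pos (by simpa using hc), List.sum_cons, List.sum_cons, ih]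

-- the generator 'c for row in land for c in row if c' is the filtered flattening
lemma pvFlatMapFilter (land : List (List Int)) :
    land.flatMap (fun row => row.filter (fun c => c ≠ 0))
    = land.flatten.filter (fun c => c ≠ 0) := by
  induction land with
  | nil => simp
  | cons r t ih => rw [List.flatMap_cons, List.flatten_cons, List.filter_append, ih]

-- B's prefix loop builds the list of prefix sums
lemma pvPrefixBuild (s : List Int) : ∀ (acc : List Int) (run : Int),
    (s.foldl (fun st h => (st.1 ++ [st.2 + h], st.2 + h)) (acc, run)).1
    = acc ++ (List.range s.length).map (fun k => run + (s.take (k + 1)).sum) := by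
  induction s with
  | nil => intro acc run; simp
  | cons h t ih =>
    intro acc run
    rw [List.foldl_cons]
    dsimp only
    rw [ih (acc ++ [run + h]) (run + h), List.length_cons, List.range_succ_eq_map,
      List.map_cons, List.map_map, List.append_assoc]
    congr 1
    rw [List.singleton_append]
    congr 1
    · simp
    · apply List.map_congr_left
      intro k _
      simp only [Function.comp_apply, List.take_succ_cons, List.sum_cons]
      ring

-- a loop 'for i in range(len(l)): … l[i] …' is a fold over l
lemma pvFoldRange (l : List Int) (f : Int → Int) : ∀ (b : Int),
    (List.range l.length).foldl (fun b k => min b (f (l.getD k 0))) b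
    = l.foldl (fun b x => min b (f x)) b := by
  induction l using List.reverseRecOn with
  | nil => intro b; simp
  | append_singleton t x ih =>
    intro b
    rw [List.length_append, List.length_cons, List.length_nil, List.range_succ,
      List.foldl_append, List.foldl_append]
    have hcong : (List.range t.length).foldl (fun b k => min b (f ((t ++ [x]).getD k 0))) b
        = (List.range t.length).foldl (fun b k => min b (f (t.getD k 0))) b := by
      apply PySem.List.foldl_congr_mem
      intro acc k hk
      have hk' : k < t.length := List.mem_range.mp hk
      rw [List.getD, List.getD, List.getElem?_append_left hk']
    rw [hcong, ih b]
    simp [List.getD]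

-- a min-fold only sees the SET of the list's elements
lemma pvFoldMinSet (l1 l2 : List Int) (h12 : ∀ x ∈ l1, x ∈ l2) (h21 : ∀ x ∈ l2, x ∈ l1)
    (a : Int) : l1.foldl min a = l2.foldl min a := by
  apply le_antisymm
  · rcases PySem.List.foldl_min_mem l2 a with h | h
    · rw [h]; exact (PySem.List.foldl_min_le l1 a).1
    · exact (PySem.List.foldl_min_le l1 a).2 _ (h21 _ h)
  · rcases PySem.List.foldl_min_mem l1 a with h | h
    · rw [h]; exact (PySem.List.foldl_min_le l2 a).1
    · exact (PySem.List.foldl_min_le l2 a).2 _ (h12 _ h)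

-- reading the prefix-sum list
lemma pvPrefixGet (s : List Int) (j : Nat) (hj : j ≤ s.length) :
    (([0] ++ (List.range s.length).map (fun k => 0 + (s.take (k + 1)).sum)) : List Int).getD j 0
    = (s.take j).sum := by
  cases j with
  | zero => simp
  | succ k =>
    rw [List.singleton_append, List.getD_cons_succ, List.getD, List.getElem?_map,
      List.getElem?_range (by omega)]
    simp

-- the per-index closed-form cost of B equals A's closed form at the height s[j]
lemma pvCost_eq (cells s : List Int) (hperm : s.Perm (cells.filter (fun c => c ≠ 0)))
    (hpw : List.Pairwise (· ≤ ·) s) (n : Int) (j : Nat) (hj : j < s.length) :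
    (((cells.count 0 : Int)) * s[j] + s[j] * ((j : Int) + 1) - (s.take (j + 1)).sum = pvFlF cells s[j])
    ∧ (s.sum - (s.take (j + 1)).sum - (n * n - (cells.count 0 : Int) - (j : Int) - 1) * s[j]
        = pvOvF cells (n * n - (cells.length : Int)) s[j]) := by
  set nz := cells.filter (fun c => c ≠ 0) with hnz
  set h := s[j] with hh
  have hsplit := List.take_append_drop (j + 1) s
  have htake_le : ∀ x ∈ s.take (j + 1), x ≤ h := by
    intro x hx
    obtain ⟨k, hk, hxe⟩ := List.mem_iff_getElem.mp hx
    have hk' : k < j + 1 := by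
      have := hk; rw [List.length_take] at this; omega
    rw [List.getElem_take] at hxe
    rcases Nat.lt_or_ge k j with hkj | hkj
    · have := List.pairwise_iff_getElem.mp hpw k j (by omega) hj hkj
      omega
    · have : k = j := by omega
      subst this; omega
  have hdrop_ge : ∀ x ∈ s.drop (j + 1), h ≤ x := by
    intro x hx
    obtain ⟨k, hk, hxe⟩ := List.mem_iff_getElem.mp hx
    rw [List.getElem_drop] at hxe
    have hk' : j + 1 + k < s.length := by
      have := hk; rw [List.length_drop] at this; omega
    have := List.pairwise_iff_getElem.mp hpw j (j + 1 + k) hj hk' (by omega)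
    omega
  have hlt : ((s.take (j + 1)).length : Int) = (j : Int) + 1 := by
    rw [List.length_take]; omega
  have hld : ((s.drop (j + 1)).length : Int) = (s.length : Int) - (j : Int) - 1 := by
    rw [List.length_drop]; push_cast; omega
  have hmax : (nz.map (fun c => max (h - c) 0)).sum = h * ((j : Int) + 1) - (s.take (j + 1)).sum := by
    have hph := (hperm.map (fun c => max (h - c) 0)).sum_eq
    rw [← hph]
    conv_lhs => rw [← hsplit]
    rw [List.map_append, List.sum_append,
      pvMaxLe h _ htake_le, pvMaxGe h _ hdrop_ge, hlt]
    ring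
  have hmin : (nz.map (fun c => min c h)).sum
      = (s.take (j + 1)).sum + h * ((s.length : Int) - (j : Int) - 1) := by
    have hph := (hperm.map (fun c => min c h)).sum_eq
    rw [← hph]
    conv_lhs => rw [← hsplit]
    rw [List.map_append, List.sum_append,
      pvMinLe h _ htake_le, pvMinGe h _ hdrop_ge, hld]
  have hsum : s.sum = cells.sum := by
    rw [hperm.sum_eq, hnz, pvSumFilterNe]
  have hlen : (s.length : Int) = (cells.length : Int) - (cells.count 0 : Int) := by
    rw [hperm.length_eq, hnz]
    exact pvNzLen cells
  constructor
  · unfold pvFlF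
    rw [← hnz, hmax]
    ring
  · unfold pvOvF
    rw [← hnz, hmin, hsum, hlen]
    ring

theorem solution_eq (land : List (List Int)) (P Q : Int) :
    solution land P Q = solution_alt land P Q := by
  set cells := land.flatten with hc
  set nz := cells.filter (fun c => c ≠ 0) with hnz
  set pad : Int := (land.length : Int) * (land.length : Int) - (cells.length : Int) with hpad
  set s := PySem.List.sorted nz (fun x => x) false with hs
  set flags := PySem.List.sorted (PySem.Set.ofList nz) (fun x => x) false with hflags
  have hsperm : s.Perm nz := PySem.List.sorted_perm ..
  have hspw : List.Pairwise (· ≤ ·) s := PySem.List.sorted_pairwise ..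
  -- B unfolded: prefix list and indexed loop reduced to a fold of the closed-form cost over s
  have hB : solution_alt land P Q
      = s.foldl (fun b x => min b (pvCF P Q cells pad x)) (cells.sum * Q) := by
    unfold solution_alt
    dsimp only
    rw [pvFlatMapFilter, ← hc, ← hnz, ← hs, pvPrefixBuild s [0] 0]
    have hzeros : (land.map (fun row => ((row.count 0 : Nat) : Int))).sum = ((cells.count 0 : Nat) : Int) := by
      rw [hc, List.count_flatten, Nat.cast_list_sum, List.map_map]
      rfl
    have hbest0 : (land.map (fun row => row.sum)).sum = cells.sum := by
      rw [hc, List.sum_flatten]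
    rw [hzeros, hbest0, PySem.List.pyRange_zero_natCast, List.foldl_map,
      ← pvFoldRange s (pvCF P Q cells pad) (cells.sum * Q)]
    apply PySem.List.foldl_congr_mem
    intro acc k hk
    have hk' : k < s.length := List.mem_range.mp hk
    have e1 : ((k : Int) + 1) = ((k + 1 : Nat) : Int) := by push_cast; ring
    rw [e1, PySem.List.pyGetD_natCast, PySem.List.pyGetD_natCast, PySem.List.pyGetD_natCast,
      pvPrefixGet s (k + 1) (by omega), pvPrefixGet s s.length (le_refl _), List.take_length,
      List.getD_eq_getElem s 0 hk']
    obtain ⟨hfill, hover⟩ := pvCost_eq cells s hsperm hspw (land.length : Int) k hk'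
    rw [← hpad] at hover
    unfold pvCF
    congr 1
    rw [← hfill, ← hover]
    push_cast
    ring
  rw [pvA_eq land P Q, ← hc, ← hnz, ← hpad, ← hflags, hB]
  conv_lhs => rw [← List.foldl_map]
  conv_rhs => rw [← List.foldl_map]
  have hmemf : ∀ x, x ∈ flags ↔ x ∈ nz := by
    intro x
    rw [hflags, PySem.List.mem_sorted, PySem.Set.mem_ofList]
  have hmems : ∀ x, x ∈ s ↔ x ∈ nz := fun x => hsperm.mem_iff
  apply pvFoldMinSet
  · intro x hx
    obtain ⟨f, hf, rfl⟩ := List.mem_map.mp hx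
    exact List.mem_map.mpr ⟨f, (hmems f).mpr ((hmemf f).mp hf), rfl⟩
  · intro x hx
    obtain ⟨f, hf, rfl⟩ := List.mem_map.mp hx
    exact List.mem_map.mpr ⟨f, (hmemf f).mpr ((hmems f).mp hf), rfl⟩

-- ===== VERDICT (by name: the statement is the Claim_ definition above) =====
theorem solution_spec : Claim_equal_solution := by
  intro land P Q _
  unfold Spec_solution
  exact solution_eq land P Q
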